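-- pv_equiv track=rewrite | github.com/SantoshKumarSingh64/GeeksforGeeks-30-Days-of-Code-Challenge | D07/Day7Solution.py | ValidPair
-- ===== SOURCE A (Python) =====
-- def ValidPair(a, n):
-- 	# Your code goes here
-- 	a.sort()
-- 	low = 0
-- 	high = n-1
-- 	count = 0
-- 	while low < high:
-- 	    if a[low]+a[high] <= 0:
-- 	        low += 1
-- 	    else:
-- 	        count += (high-low)
-- 	        high -= 1
-- 	return count
-- ===== SOURCE B (Python) =====
-- def ValidPair(a, n):
--     # sorts a in place like the original; per-element binary search over the sorted suffix
--     a.sort()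
--     total = 0
--     for i in range(n):
--         lo, hi = i + 1, n
--         while lo < hi:
--             mid = (lo + hi) // 2
--             if a[i] + a[mid] > 0:
--                 hi = mid
--             else:
--                 lo = mid + 1
--         total += n - lo
--     return total
-- ===== Notes on version B (the rewrite author's own statement) =====
-- stated objective: alternative
-- what changed: Replaces the converging two-pointer while-loop (running count of suffix sizes) by a per-element binary search on the sorted list: for each i below n it binary-searches the first partner j>i with a[i]+a[j]>0 and adds n minus that position.
import Mathlib
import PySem

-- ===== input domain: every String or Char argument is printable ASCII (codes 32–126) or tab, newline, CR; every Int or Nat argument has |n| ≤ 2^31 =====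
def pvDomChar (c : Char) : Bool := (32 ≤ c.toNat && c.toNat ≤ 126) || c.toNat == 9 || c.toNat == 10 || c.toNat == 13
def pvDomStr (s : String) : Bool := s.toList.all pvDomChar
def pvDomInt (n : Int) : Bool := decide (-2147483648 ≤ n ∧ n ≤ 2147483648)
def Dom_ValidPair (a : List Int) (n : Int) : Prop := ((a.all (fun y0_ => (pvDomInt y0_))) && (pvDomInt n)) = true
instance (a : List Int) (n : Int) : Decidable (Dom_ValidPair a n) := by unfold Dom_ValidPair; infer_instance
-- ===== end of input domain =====

-- B replaces the converging two-pointer loop by a per-element binary search over the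
-- sorted suffix (objective: alternative). Both A and B sort `a` in place in Python;
-- the equivalence proved here is about the return value.

-- ===== PORT A =====
-- the two-pointer while loop; terminates because high-low shrinks each step
def ValidPairGo (s : List Int) (low high count : Int) : Int :=
  if _h : low < high then
    if (PySem.List.pyGet? s low).getD 0 + (PySem.List.pyGet? s high).getD 0 ≤ 0 then
      ValidPairGo s (low + 1) high count
    else
      ValidPairGo s low (high - 1) (count + (high - low))
  else count
termination_by (high - low).toNat
decreasing_by all_goals omega

def ValidPair (a : List Int) (n : Int) : Int :=
  let s := PySem.List.sorted a (fun x => x) false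
  ValidPairGo s 0 (n - 1) 0

-- ===== PORT B =====
-- the inner while loop of B: binary search for the first j in [lo, hi) with s[i]+s[j] > 0
def ValidPairBS (s : List Int) (i lo hi : Int) : Int :=
  if _h : lo < hi then
    if (PySem.List.pyGet? s i).getD 0 + (PySem.List.pyGet? s (PySem.Int.floordiv (lo + hi) 2)).getD 0 > 0 then
      ValidPairBS s i lo (PySem.Int.floordiv (lo + hi) 2)
    else
      ValidPairBS s i (PySem.Int.floordiv (lo + hi) 2 + 1) hi
  else lo
termination_by (hi - lo).toNat
decreasing_by
  all_goals
    have h1 := PySem.Int.floordiv_two_mid_bounds (le_of_lt _h)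
    have h2 : PySem.Int.floordiv (lo + hi) 2 < hi :=
      (PySem.Int.floordiv_lt_iff_lt_mul (show (0:Int) < 2 by norm_num)).mpr (by omega)
    omega

def ValidPair_alt (a : List Int) (n : Int) : Int :=
  let s := PySem.List.sorted a (fun x => x) false
  (PySem.List.pyRange 0 n 1).foldl (fun total i => total + (n - ValidPairBS s i (i + 1) n)) 0

-- ===== PRECONDITION & SPEC =====
-- Pre_ excludes exactly the inputs where the Python A raises IndexError: when
-- n ≥ 2 exceeds len(a) the loop reads a[n-1] out of range.
def Pre_ValidPair (a : List Int) (n : Int) : Prop := n ≤ (a.length : Int) ∨ n ≤ 1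
instance (a : List Int) (n : Int) : Decidable (Pre_ValidPair a n) := by unfold Pre_ValidPair; infer_instance

def pvWitness_ValidPair : List Int × Int := ([3, -1, 2, -2], 4)

def Spec_ValidPair (a : List Int) (n : Int) (out : Int) : Prop := out = ValidPair_alt a n
instance (a : List Int) (n : Int) (out : Int) : Decidable (Spec_ValidPair a n out) := by unfold Spec_ValidPair; infer_instance

-- ===== CLAIM (what is proved, stated in full; the proofs are below) =====
def Claim_equal_ValidPair : Prop := ∀ (a : List Int) (n : Int), Dom_ValidPair a n → Pre_ValidPair a n → Spec_ValidPair a n (ValidPair a n)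

-- ===== LEMMAS AND PROOFS =====

-- value at an index, as the ports read it
def pvAt (s : List Int) (i : Int) : Int := (PySem.List.pyGet? s i).getD 0

-- count of j in [lo, hi) with s[i]+s[j] > 0
def pvRow (s : List Int) (i lo hi : Int) : Int :=
  (PySem.List.pyRange lo hi 1).foldl (fun acc j => if pvAt s i + pvAt s j > 0 then acc + 1 else acc) 0

-- count of pairs i<j in [l, h) with s[i]+s[j] > 0 — the common meaning of both ports
def pvTot (s : List Int) (l h : Int) : Int :=
  (PySem.List.pyRange l h 1).foldl (fun acc i => acc + pvRow s i (i + 1) h) 0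

theorem pvFoldl_if_acc (s : List Int) (i : Int) (js : List Int) (acc : Int) :
    js.foldl (fun a j => if pvAt s i + pvAt s j > 0 then a + 1 else a) acc
      = acc + js.foldl (fun a j => if pvAt s i + pvAt s j > 0 then a + 1 else a) 0 := by
  induction js generalizing acc with
  | nil => simp
  | cons x xs ih =>
    simp only [List.foldl_cons]
    rw [ih, ih (if pvAt s i + pvAt s x > 0 then 0 + 1 else 0)]
    split <;> ring

theorem pvFoldl_add_acc (f : Int → Int) (is : List Int) (acc : Int) :
    is.foldl (fun a i => a + f i) acc = acc + is.foldl (fun a i => a + f i) 0 := by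
  induction is generalizing acc with
  | nil => simp
  | cons x xs ih =>
    simp only [List.foldl_cons]
    rw [ih, ih (0 + f x)]
    ring

theorem pvTot_cons (s : List Int) (l h : Int) (hlt : l < h) :
    pvTot s l h = pvRow s l (l + 1) h + pvTot s (l + 1) h := by
  unfold pvTot
  rw [PySem.List.pyRange_one_cons hlt, List.foldl_cons,
      pvFoldl_add_acc (fun i => pvRow s i (i + 1) h)]
  ring

theorem pvTot_empty (s : List Int) (l h : Int) (hle : h ≤ l) : pvTot s l h = 0 := by
  unfold pvTot
  rw [PySem.List.pyRange_one_eq_nil hle]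
  rfl

theorem pvRow_empty (s : List Int) (i lo hi : Int) (hle : hi ≤ lo) : pvRow s i lo hi = 0 := by
  unfold pvRow
  rw [PySem.List.pyRange_one_eq_nil hle]
  rfl

theorem pvRow_snoc (s : List Int) (i lo hi : Int) (hle : lo ≤ hi) :
    pvRow s i lo (hi + 1)
      = pvRow s i lo hi + (if pvAt s i + pvAt s hi > 0 then 1 else 0) := by
  unfold pvRow
  rw [PySem.List.pyRange_one_succ_right hle, List.foldl_append]
  simp only [List.foldl_cons, List.foldl_nil]
  rw [pvFoldl_if_acc]
  split <;> ring

theorem pvRow_split (s : List Int) (i lo m hi : Int) (h1 : lo ≤ m) (h2 : m ≤ hi) :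
    pvRow s i lo hi = pvRow s i lo m + pvRow s i m hi := by
  unfold pvRow
  rw [PySem.List.pyRange_one_append lo m hi h1 h2, List.foldl_append, pvFoldl_if_acc]

-- a row over a range where the predicate is everywhere false is 0
theorem pvRow_zero (s : List Int) (i lo hi : Int)
    (hall : ∀ j : Int, lo ≤ j → j < hi → pvAt s i + pvAt s j ≤ 0) : pvRow s i lo hi = 0 := by
  rcases lt_or_ge hi lo with h | h
  · exact pvRow_empty s i lo hi (by omega)
  · have key : ∀ k : Nat, lo + k ≤ hi → pvRow s i lo (lo + k) = 0 := by
      intro k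
      induction k with
      | zero => intro _; simpa using pvRow_empty s i lo (lo + ((0:Nat):Int)) (by omega)
      | succ m ih =>
        intro hm
        have hsplit : lo + (m + 1 : Nat) = (lo + m) + 1 := by push_cast; ring
        rw [hsplit, pvRow_snoc s i lo (lo + m) (by omega), ih (by omega)]
        have h2 : ¬ (pvAt s i + pvAt s (lo + m) > 0) := by
          have := hall (lo + m) (by omega) (by omega)
          omega
        simp [h2]
    have := key (hi - lo).toNat (by omega)
    rw [show lo + ((hi - lo).toNat : Int) = hi by omega] at this
    exact this

-- a row over a range where the predicate is everywhere true is the range's length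
theorem pvRow_full (s : List Int) (i lo hi : Int) (hle : lo ≤ hi)
    (hall : ∀ j : Int, lo ≤ j → j < hi → pvAt s i + pvAt s j > 0) : pvRow s i lo hi = hi - lo := by
  have key : ∀ k : Nat, lo + k ≤ hi → pvRow s i lo (lo + k) = k := by
    intro k
    induction k with
    | zero => intro _; simpa using pvRow_empty s i lo (lo + ((0:Nat):Int)) (by omega)
    | succ m ih =>
      intro hm
      have hsplit : lo + (m + 1 : Nat) = (lo + m) + 1 := by push_cast; ring
      rw [hsplit, pvRow_snoc s i lo (lo + m) (by omega), ih (by omega)]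
      have h2 : pvAt s i + pvAt s (lo + m) > 0 := hall (lo + m) (by omega) (by omega)
      simp only [h2, if_pos]
      push_cast; ring
  have := key (hi - lo).toNat (by omega)
  rw [show lo + ((hi - lo).toNat : Int) = hi by omega] at this
  rw [this]; omega

-- sortedness: values at valid indices are monotone
theorem pvAt_mono (s : List Int) (hs : s.Pairwise (· ≤ ·)) (i j : Int)
    (h0 : 0 ≤ i) (hij : i ≤ j) (hj : j < (s.length : Int)) : pvAt s i ≤ pvAt s j := by
  rcases eq_or_lt_of_le hij with rfl | hij'
  · exact le_refl _
  · have hi' : i.toNat < s.length := by omega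
    have hj' : j.toNat < s.length := by omega
    have e1 : pvAt s i = s[i.toNat] := by
      simp [pvAt, PySem.List.pyGet?_eq_some_getElem s h0 (by omega)]
    have e2 : pvAt s j = s[j.toNat] := by
      simp [pvAt, PySem.List.pyGet?_eq_some_getElem s (show (0:Int) ≤ j by omega) hj]
    rw [e1, e2]
    exact List.pairwise_iff_getElem.mp hs i.toNat j.toNat hi' hj' (by omega)

-- each i in [l,h) pairs with h when s[l] + s[h] > 0: peeling h off pvTot yields h - l
theorem pvTot_peel_high (s : List Int) (hs : s.Pairwise (· ≤ ·)) (l h : Int)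
    (h0 : 0 ≤ l) (hlh : l ≤ h) (hh : h < (s.length : Int))
    (hgt : pvAt s l + pvAt s h > 0) : pvTot s l (h + 1) = (h - l) + pvTot s l h := by
  generalize hk : (h - l).toNat = k
  induction k generalizing l with
  | zero =>
    have : l = h := by omega
    subst this
    rw [pvTot_cons s l (l + 1) (by omega), pvTot_empty s (l + 1) (l + 1) le_rfl,
        pvRow_empty s l (l + 1) (l + 1) le_rfl, pvTot_empty s l l le_rfl]
    ring
  | succ k ih =>
    have hlh' : l < h := by omega
    have hgt' : pvAt s (l + 1) + pvAt s h > 0 := by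
      have := pvAt_mono s hs l (l + 1) h0 (by omega) (by omega)
      omega
    rw [pvTot_cons s l (h + 1) (by omega), pvTot_cons s l h hlh',
        ih (l + 1) (by omega) (by omega) hgt' (by omega),
        pvRow_snoc s l (l + 1) h (by omega)]
    have : pvAt s l + pvAt s h > 0 := hgt
    simp only [this, if_pos]
    ring

-- A-side invariant: the two-pointer loop computes count + pairs in [low, high]
theorem pvGo_eq (s : List Int) (hs : s.Pairwise (· ≤ ·)) :
    ∀ (low high count : Int), 0 ≤ low → high < (s.length : Int) →
      ValidPairGo s low high count = count + pvTot s low (high + 1) := by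
  intro low high count h0 hh
  generalize hk : (high - low).toNat = k
  induction k generalizing low high count with
  | zero =>
    rw [ValidPairGo]
    have hnl : ¬ low < high := by omega
    rw [dif_neg hnl]
    rcases lt_or_ge high low with hcase | hcase
    · rw [pvTot_empty s low (high + 1) (by omega)]; ring
    · have : low = high := by omega
      subst this
      rw [pvTot_cons s low (low + 1) (by omega), pvTot_empty s (low + 1) (low + 1) le_rfl,
          pvRow_empty s low (low + 1) (low + 1) le_rfl]
      ring
  | succ k ih =>
    have hlt : low < high := by omega
    rw [ValidPairGo, dif_pos hlt]
    by_cases hc : pvAt s low + pvAt s high ≤ 0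
    · have hc' : (PySem.List.pyGet? s low).getD 0 + (PySem.List.pyGet? s high).getD 0 ≤ 0 := hc
      rw [if_pos hc', ih (low + 1) high count (by omega) hh (by omega)]
      rw [pvTot_cons s low (high + 1) (by omega),
          pvRow_zero s low (low + 1) (high + 1) (fun j hj1 hj2 => by
            have hmono := pvAt_mono s hs j high (by omega) (by omega) hh
            omega)]
      ring
    · have hc' : ¬ (PySem.List.pyGet? s low).getD 0 + (PySem.List.pyGet? s high).getD 0 ≤ 0 := hc
      rw [if_neg hc', ih low (high - 1) (count + (high - low)) h0 (by omega) (by omega)]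
      have hgt : pvAt s low + pvAt s high > 0 := by
        simp only [pvAt]; omega
      have := pvTot_peel_high s hs low high h0 (by omega) hh hgt
      rw [show high - 1 + 1 = high by ring, this]
      ring

-- B-side invariant: the binary search finds the threshold, so each row is hi - result
theorem pvBS_row (s : List Int) (hs : s.Pairwise (· ≤ ·)) (n : Int)
    (hn : n ≤ (s.length : Int)) (i : Int) (h0 : 0 ≤ i) :
    ∀ (lo hi : Int), i + 1 ≤ lo → lo ≤ hi → hi ≤ n →
      pvRow s i lo hi = hi - ValidPairBS s i lo hi := by
  intro lo hi h1 h2 h3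
  generalize hk : (hi - lo).toNat = k
  induction k using Nat.strong_induction_on generalizing lo hi with
  | _ k ih =>
    rw [ValidPairBS]
    by_cases hlt : lo < hi
    · rw [dif_pos hlt]
      have hmid := PySem.Int.floordiv_two_mid_bounds (le_of_lt hlt)
      have hmidlt : PySem.Int.floordiv (lo + hi) 2 < hi :=
        (PySem.Int.floordiv_lt_iff_lt_mul (show (0:Int) < 2 by norm_num)).mpr (by omega)
      set mid := PySem.Int.floordiv (lo + hi) 2 with hmdef
      by_cases hp : pvAt s i + pvAt s mid > 0
      · have hp' : (PySem.List.pyGet? s i).getD 0 + (PySem.List.pyGet? s mid).getD 0 > 0 := hp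
        rw [if_pos hp']
        rw [pvRow_split s i lo mid hi (by omega) (by omega),
            pvRow_full s i mid hi (by omega) (fun j hj1 hj2 => by
              have := pvAt_mono s hs mid j (by omega) hj1 (by omega)
              omega),
            ih (mid - lo).toNat (by omega) lo mid h1 (by omega) (by omega) rfl]
        ring
      · have hp' : ¬ (PySem.List.pyGet? s i).getD 0 + (PySem.List.pyGet? s mid).getD 0 > 0 := hp
        rw [if_neg hp']
        rw [pvRow_split s i lo (mid + 1) hi (by omega) (by omega),
            pvRow_zero s i lo (mid + 1) (fun j hj1 hj2 => by
              have := pvAt_mono s hs j mid (by omega) (by omega) (by omega)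
              omega),
            ih (hi - (mid + 1)).toNat (by omega) (mid + 1) hi (by omega) (by omega) h3 rfl]
        ring
    · rw [dif_neg hlt]
      rw [pvRow_empty s i lo hi (by omega)]
      omega

-- B equals the pair count when the searched indices are valid
theorem ValidPair_alt_eq_tot (a : List Int) (n : Int)
    (hn : n ≤ ((PySem.List.sorted a (fun x => x) false).length : Int)) :
    ValidPair_alt a n = pvTot (PySem.List.sorted a (fun x => x) false) 0 n := by
  unfold ValidPair_alt pvTot
  apply List.foldl_ext
  intro acc i hi
  have hmem := (PySem.List.mem_pyRange_one).mp hi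
  have hrow := pvBS_row (PySem.List.sorted a (fun x => x) false)
    (PySem.List.sorted_pairwise a (fun x => x)) n hn i hmem.1 (i + 1) n (by omega) (by omega) le_rfl
  omega

-- the degenerate case n ≤ 1: B returns 0 whatever the list is
theorem ValidPair_alt_small (a : List Int) (n : Int) (hn : n ≤ 1) : ValidPair_alt a n = 0 := by
  simp only [ValidPair_alt]
  rcases le_or_gt n 0 with h | h
  · rw [PySem.List.pyRange_one_eq_nil h]
    rfl
  · have : n = 1 := by omega
    subst this
    rw [PySem.List.pyRange_one_cons (show (0:Int) < 1 by norm_num),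
        PySem.List.pyRange_one_eq_nil (show (1:Int) ≤ 0 + 1 by omega)]
    simp only [List.foldl_cons, List.foldl_nil]
    rw [ValidPairBS, dif_neg (show ¬(0 + 1 < (1:Int)) by omega)]
    ring

-- ===== VERDICT (by name: the statement is the Claim_ definition above) =====
theorem ValidPair_spec : Claim_equal_ValidPair := by
  intro a n _ hpre
  unfold Spec_ValidPair
  set s := PySem.List.sorted a (fun x => x) false with hsdef
  have hs : s.Pairwise (· ≤ ·) := PySem.List.sorted_pairwise a (fun x => x)
  have hlen : s.length = a.length := PySem.List.length_sorted a (fun x => x) false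
  unfold ValidPair
  rw [← hsdef]
  rcases le_or_gt n 1 with hn1 | hn1
  · rw [ValidPair_alt_small a n hn1, ValidPairGo, dif_neg (by omega)]
  · have hle : n ≤ (s.length : Int) := by
      rcases hpre with h | h
      · omega
      · omega
    rw [ValidPair_alt_eq_tot a n (by rw [← hsdef]; exact hle)]
    rw [← hsdef]
    have := pvGo_eq s hs 0 (n - 1) 0 le_rfl (by omega)
    rw [this, show n - 1 + 1 = n by ring]
    ring
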